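-- pv_equiv track=rewrite | github.com/jjss83/MENTOR | mentor-py-api/mentor_py_api/options.py | _count_leading_spaces
-- ===== SOURCE A (Python) =====
-- def _count_leading_spaces(text: str) -> int:
--     count = 0
--     for ch in text:
--         if ch == " ":
--             count += 1
--         elif ch == "\t":
--             count += 2
--         else:
--             break
--     return count
-- ===== SOURCE B (Python) =====
-- def _count_leading_spaces(text: str) -> int:
--     stripped = text.lstrip(" \t")
--     prefix = text[:len(text) - len(stripped)]
--     return len(prefix) + prefix.count("\t")
-- ===== Notes on version B (the rewrite author's own statement) =====
-- stated objective: idiomatic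
-- what changed: Replaces the early-breaking per-character loop with an lstrip-based slice that isolates the leading space/tab prefix, then computes the weighted total arithmetically from the prefix length plus its tab count.
import Mathlib
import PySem

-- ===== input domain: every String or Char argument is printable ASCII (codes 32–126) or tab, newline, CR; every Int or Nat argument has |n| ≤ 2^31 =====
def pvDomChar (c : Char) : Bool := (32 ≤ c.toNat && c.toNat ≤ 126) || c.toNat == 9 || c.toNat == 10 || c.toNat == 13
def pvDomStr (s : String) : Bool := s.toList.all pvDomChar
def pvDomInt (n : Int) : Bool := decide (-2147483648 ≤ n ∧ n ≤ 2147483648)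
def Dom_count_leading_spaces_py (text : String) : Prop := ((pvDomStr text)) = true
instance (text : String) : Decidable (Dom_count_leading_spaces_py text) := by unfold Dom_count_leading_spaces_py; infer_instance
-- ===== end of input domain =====

-- B replaces A's early-breaking loop with lstrip(" \t") to cut out the space/tab prefix, then counts arithmetically (idiomatic).

-- ===== PORT A =====
-- the loop 'for ch in text: … break' with accumulator count
def pvCountLoopA (count : Int) : List Char → Int
  | [] => count
  | ch :: rest =>
      if ch = ' ' then pvCountLoopA (count + 1) rest
      else if ch = '\t' then pvCountLoopA (count + 2) rest
      else count

def count_leading_spaces_py (text : String) : Int :=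
  pvCountLoopA 0 text.toList

-- ===== PORT B =====
-- exact port of Python str.lstrip(" \t"): drop leading characters belonging to the chars set
def pvLstripChars (cs : List Char) (chars : List Char) : List Char :=
  cs.dropWhile (fun c => chars.contains c)

def count_leading_spaces_py_alt (text : String) : Int :=
  let s := text.toList
  let stripped := pvLstripChars s [' ', '\t']
  let pre := PySem.List.slice s none (some ((s.length : Int) - (stripped.length : Int)))
  (pre.length : Int) + (PySem.Chars.count pre ['\t'] : Int)

-- ===== PRECONDITION & SPEC =====
def Spec_count_leading_spaces_py (text : String) (out : Int) : Prop := out = count_leading_spaces_py_alt text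
instance (text : String) (out : Int) : Decidable (Spec_count_leading_spaces_py text out) := by unfold Spec_count_leading_spaces_py; infer_instance

-- ===== CLAIM (what is proved, stated in full; the proofs are below) =====
def Claim_equal_count_leading_spaces_py : Prop := ∀ (text : String), Dom_count_leading_spaces_py text → Spec_count_leading_spaces_py text (count_leading_spaces_py text)

-- ===== LEMMAS AND PROOFS =====

-- single-character substring count is List.count (fuel-indexed go unrolled by induction)
theorem pvCountGo_singleton (c : Char) (l : List Char) (fuel acc : Nat)
    (h : l.length ≤ fuel) :
    PySem.Chars.count.go [c] fuel l acc = acc + l.count c := by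
  induction l generalizing fuel acc with
  | nil => cases fuel <;> simp [PySem.Chars.count.go]
  | cons hd tl ih =>
    cases fuel with
    | zero => simp at h
    | succ m =>
      simp only [PySem.Chars.count.go]
      by_cases hc : c = hd
      · subst hc
        simp only [List.isPrefixOf, Bool.and_true, beq_self_eq_true, if_pos,
          List.length_cons, List.drop_succ_cons, List.length_nil, List.drop_zero]
        rw [ih _ _ (by simpa using h)]
        simp
        omega
      · have hpre : [c].isPrefixOf (hd :: tl) = false := by
          simp [List.isPrefixOf, hc]
        rw [hpre]
        simp only [Bool.false_eq_true, if_false]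
        rw [ih _ _ (by simpa using h)]
        simp [Ne.symm hc]


theorem pvCount_singleton (c : Char) (l : List Char) :
    PySem.Chars.count l [c] = l.count c := by
  simp only [PySem.Chars.count, List.isEmpty_cons, Bool.false_eq_true, if_false]
  simpa using pvCountGo_singleton c l l.length 0 le_rfl

-- A's loop computes acc + |takeWhile| + number of tabs in takeWhile
theorem pvCountLoopA_eq (acc : Int) (l : List Char) :
    pvCountLoopA acc l =
      acc + ((l.takeWhile (fun c => c = ' ' ∨ c = '\t')).length : Int)
          + ((l.takeWhile (fun c => c = ' ' ∨ c = '\t')).count '\t' : Int) := by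
  induction l generalizing acc with
  | nil => simp [pvCountLoopA]
  | cons hd tl ih =>
    by_cases hsp : hd = ' '
    · subst hsp
      simp only [pvCountLoopA]
      rw [if_pos trivial]
      rw [ih]
      simp
      omega
    · by_cases htab : hd = '\t'
      · subst htab
        rw [show pvCountLoopA acc ('\t' :: tl) = pvCountLoopA (acc + 2) tl from by
          simp [pvCountLoopA]]
        rw [ih]
        simp
        omega
      · simp only [pvCountLoopA, if_neg hsp, if_neg htab]
        simp [hsp, htab]

theorem pv_alt_eq (text : String) :
    count_leading_spaces_py_alt text =
      ((text.toList.takeWhile (fun c => c = ' ' ∨ c = '\t')).length : Int)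
        + ((text.toList.takeWhile (fun c => c = ' ' ∨ c = '\t')).count '\t' : Int) := by
  simp only [count_leading_spaces_py_alt, pvLstripChars]
  have hpred : (fun c => [' ', '\t'].contains c) = (fun c => decide (c = ' ' ∨ c = '\t')) := by
    funext c
    by_cases h1 : c = ' ' <;> by_cases h2 : c = '\t' <;> simp [h1, h2]
  rw [hpred]
  set p : Char → Bool := fun c => decide (c = ' ' ∨ c = '\t') with hp
  have hlen' : (text.toList.takeWhile p).length + (text.toList.dropWhile p).length
      = text.toList.length := by
    have h2 := congrArg List.length (List.takeWhile_append_dropWhile (p := p) (l := text.toList))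
    rw [List.length_append] at h2
    exact h2
  have hlen : (text.toList.length : Int) - ((text.toList.dropWhile p).length : Int)
      = ((text.toList.takeWhile p).length : Nat) := by
    omega
  rw [hlen, PySem.List.slice_to_natCast]
  have hpre : text.toList.take (text.toList.takeWhile p).length = text.toList.takeWhile p :=
    ((List.prefix_iff_eq_take).mp (List.takeWhile_prefix p)).symm
  rw [hpre, pvCount_singleton]

-- ===== VERDICT (by name: the statement is the Claim_ definition above) =====
theorem count_leading_spaces_py_spec : Claim_equal_count_leading_spaces_py := by
  intro text _
  unfold Spec_count_leading_spaces_py count_leading_spaces_py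
  rw [pv_alt_eq, pvCountLoopA_eq]
  ring
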